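-- pv_equiv track=rewrite | github.com/msgr0/graph-theory | viviani/e2.py | mat2csr
-- ===== SOURCE A (Python) =====
-- def getnnz(mat):
--     c = 0
--     for x in range(len(mat)):
--         for y in range(len(mat[0])):
--             if mat[x][y] != 0:
--                 c += 1
--     return c
--
-- def mat2csr(mat):
--     n = len(mat)
--     m = len(mat[0])
--
--     nnz = getnnz(mat)
--
--     csr = [
--         [None for _ in range(nnz)],  # v array
--         [None for _ in range(nnz)],  # c array
--         [None for _ in range(n + 1)],  # r array
--     ]
--     csr[2][0] = 0
--
--     vci = 0
--     ri = 1
--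
--     for x in range(n):
--         for y in range(m):
--             val = mat[x][y]
--             if val != 0:
--                 csr[0][vci] = val
--                 csr[1][vci] = y
--                 vci += 1
--         csr[2][ri] = vci
--         ri += 1
--
--     return csr
-- ===== SOURCE B (Python) =====
-- def mat2csr(mat):
--     m = len(mat[0])
--     # intermediate sparse row representation (LIL): per row, its (col, value) pairs
--     pairs = [[(y, row[y]) for y in range(m) if row[y] != 0] for row in mat]
--     v = [val for p in pairs for (_, val) in p]
--     c = [y for p in pairs for (y, _) in p]
--     r = [sum(len(p) for p in pairs[:i]) for i in range(len(mat) + 1)]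
--     return [v, c, r]
-- ===== Notes on version B (the rewrite author's own statement) =====
-- stated objective: alternative
-- what changed: Replaces A's count-then-preallocate-and-fill construction (getnnz pass, None arrays, write cursors vci/ri) by an intermediate LIL sparse representation: a per-row list of (column,value) pairs built by comprehensions, from which v and c are flattened projections and r is the list of prefix sums of the per-row pair counts; no mutation or index bookkeeping.
import Mathlib
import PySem

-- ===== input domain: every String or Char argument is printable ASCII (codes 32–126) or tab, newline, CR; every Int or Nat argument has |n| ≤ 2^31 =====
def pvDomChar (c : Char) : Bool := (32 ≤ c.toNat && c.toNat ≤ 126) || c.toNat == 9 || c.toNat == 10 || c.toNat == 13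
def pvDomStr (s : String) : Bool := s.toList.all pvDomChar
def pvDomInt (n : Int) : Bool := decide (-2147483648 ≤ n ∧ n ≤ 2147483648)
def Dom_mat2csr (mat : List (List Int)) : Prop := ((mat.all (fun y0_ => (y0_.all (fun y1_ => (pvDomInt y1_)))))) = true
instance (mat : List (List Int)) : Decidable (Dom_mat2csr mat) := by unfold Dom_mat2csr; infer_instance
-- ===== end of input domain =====

-- B replaces A's count/preallocate/fill construction by an intermediate per-row list of
-- (column,value) pairs, flattened projections for v and c, and prefix sums for r
-- (objective: alternative decomposition).

-- ===== PORT A =====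
def getnnz (mat : List (List Int)) : Int :=
  (List.range mat.length).foldl (fun c x =>
    (List.range (mat.headD []).length).foldl (fun c y =>
      if (mat.getD x []).getD y 0 ≠ 0 then c + 1 else c) c) 0

def mat2csr (mat : List (List Int)) : List (List Int) :=
  let n := mat.length
  let m := (mat.headD []).length
  let nnz := (getnnz mat).toNat
  -- the three preallocated arrays (None placeholders modelled as 0; every cell that
  -- remains in the result is overwritten before being read, under Pre_)
  let v0 : List Int := List.replicate nnz 0
  let c0 : List Int := List.replicate nnz 0
  let r0 : List Int := (List.replicate (n + 1) 0).set 0 0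
  let fin :=
    (List.range n).foldl (fun (st : (List Int × List Int × List Int) × Nat × Nat) x =>
      let st2 :=
        (List.range m).foldl (fun (st : (List Int × List Int × List Int) × Nat × Nat) y =>
          let val := (mat.getD x []).getD y 0
          if val ≠ 0 then
            ((st.1.1.set st.2.1 val, st.1.2.1.set st.2.1 (y : Int), st.1.2.2),
             st.2.1 + 1, st.2.2)
          else st) st
      ((st2.1.1, st2.1.2.1, st2.1.2.2.set st2.2.2 (st2.2.1 : Int)), st2.2.1, st2.2.2 + 1))
    ((v0, c0, r0), 0, 1)
  [fin.1.1, fin.1.2.1, fin.1.2.2]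

-- ===== PORT B =====
-- row[y] for y < len(mat[0]) is in range on every input admitted by Pre_, so it is
-- ported as getD (exact there)
def mat2csr_alt (mat : List (List Int)) : List (List Int) :=
  let m := (mat.headD []).length
  let pairs : List (List (Int × Int)) :=
    mat.map (fun row => (List.range m).filterMap (fun (y : Nat) =>
      if row.getD y 0 ≠ 0 then some ((y : Int), row.getD y 0) else none))
  let v := pairs.flatMap (fun p => p.map (fun q => q.2))
  let c := pairs.flatMap (fun p => p.map (fun q => q.1))
  let r := (List.range (mat.length + 1)).map (fun i =>
      ((pairs.take i).map (fun p => (p.length : Int))).sum)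
  [v, c, r]

-- ===== PRECONDITION & SPEC =====
-- Pre_ excludes exactly the inputs on which Python A raises IndexError: the empty matrix
-- (mat[0]) and matrices with a row shorter than the first row (mat[x][y] for y < m).
def Pre_mat2csr (mat : List (List Int)) : Prop :=
  mat ≠ [] ∧ ∀ row ∈ mat, (mat.headD []).length ≤ row.length
instance (mat : List (List Int)) : Decidable (Pre_mat2csr mat) := by unfold Pre_mat2csr; infer_instance

def pvWitness_mat2csr : List (List Int) := [[1, 0], [0, 2]]

def Spec_mat2csr (mat : List (List Int)) (out : List (List Int)) : Prop := out = mat2csr_alt mat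
instance (mat : List (List Int)) (out : List (List Int)) : Decidable (Spec_mat2csr mat out) := by unfold Spec_mat2csr; infer_instance

-- ===== CLAIM (what is proved, stated in full; the proofs are below) =====
def Claim_equal_mat2csr : Prop := ∀ (mat : List (List Int)), Dom_mat2csr mat → Pre_mat2csr mat → Spec_mat2csr mat (mat2csr mat)

-- ===== LEMMAS AND PROOFS =====

-- the loop bodies of port A, and the streaming fold used as intermediate spec
def fA (row : List Int) (st : (List Int × List Int × List Int) × Nat × Nat) (y : Nat) :
    (List Int × List Int × List Int) × Nat × Nat :=
  let val := row.getD y 0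
  if val ≠ 0 then
    ((st.1.1.set st.2.1 val, st.1.2.1.set st.2.1 (y : Int), st.1.2.2), st.2.1 + 1, st.2.2)
  else st

def fB (row : List Int) (p : List Int × List Int) (y : Nat) : List Int × List Int :=
  if row.getD y 0 ≠ 0 then (p.1 ++ [row.getD y 0], p.2 ++ [(y : Int)]) else p

def gA (m : Nat) (st : (List Int × List Int × List Int) × Nat × Nat) (row : List Int) :
    (List Int × List Int × List Int) × Nat × Nat :=
  let st2 := (List.range m).foldl (fA row) st
  ((st2.1.1, st2.1.2.1, st2.1.2.2.set st2.2.2 (st2.2.1 : Int)), st2.2.1, st2.2.2 + 1)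

def gB (m : Nat) (st : List Int × List Int × List Int) (row : List Int) :
    List Int × List Int × List Int :=
  let vc := (List.range m).foldl (fB row) (st.1, st.2.1)
  (vc.1, vc.2, st.2.2 ++ [(vc.1.length : Int)])

def cntRow (m : Nat) (row : List Int) : Nat :=
  (List.range m).countP (fun y => decide (row.getD y 0 ≠ 0))

def totCnt (m : Nat) (rows : List (List Int)) : Nat :=
  (rows.map (cntRow m)).sum

-- the per-row sparse pairs of port B, and the row-pointer list of the streaming fold
def rowP (m : Nat) (row : List Int) : List (Int × Int) :=
  (List.range m).filterMap (fun (y : Nat) =>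
    if row.getD y 0 ≠ 0 then some ((y : Int), row.getD y 0) else none)

def Rlist (m : Nat) (base : Nat) : List (List Int) → List Int
  | [] => []
  | row :: rest => ((base + (rowP m row).length : Nat) : Int) :: Rlist m (base + (rowP m row).length) rest

theorem map_getD_range_self {α : Type} (l : List α) (d : α) :
    (List.range l.length).map (fun x => l.getD x d) = l := by
  apply List.ext_getElem
  · simp
  · intro i h1 h2
    simp [List.getD_eq_getElem?_getD, List.getElem?_eq_getElem h2]

theorem foldl_range_getD {α β : Type} (l : List α) (d : α) (F : β → α → β) (init : β) :
    (List.range l.length).foldl (fun st x => F st (l.getD x d)) init = l.foldl F init := by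
  conv_rhs => rw [← map_getD_range_self l d]
  rw [List.foldl_map]

theorem fB_len (row : List Int) (l : List Nat) : ∀ (p : List Int × List Int),
    p.2.length = p.1.length →
    (l.foldl (fB row) p).2.length = (l.foldl (fB row) p).1.length := by
  induction l with
  | nil => intro p h; simpa using h
  | cons y l ih =>
    intro p h
    simp only [List.foldl_cons]
    apply ih
    unfold fB
    split
    · simp [h]
    · exact h

theorem inner_rel (row : List Int) (l : List Nat) : ∀ (v c rr : List Int) (ex ri : Nat),
    c.length = v.length →
    l.foldl (fA row)
      ((v ++ List.replicate (l.countP (fun y => decide (row.getD y 0 ≠ 0)) + ex) 0,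
        c ++ List.replicate (l.countP (fun y => decide (row.getD y 0 ≠ 0)) + ex) 0, rr),
       v.length, ri)
    = (((l.foldl (fB row) (v, c)).1 ++ List.replicate ex 0,
        (l.foldl (fB row) (v, c)).2 ++ List.replicate ex 0, rr),
       (l.foldl (fB row) (v, c)).1.length, ri) := by
  induction l with
  | nil => intro v c rr ex ri h; simp
  | cons y l ih =>
    intro v c rr ex ri h
    simp only [List.foldl_cons, List.countP_cons]
    by_cases hy : row.getD y 0 ≠ 0
    · have hstep : fA row
          ((v ++ List.replicate (List.countP (fun y => decide (row.getD y 0 ≠ 0)) l +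
              (if (fun y => decide (row.getD y 0 ≠ 0)) y = true then 1 else 0) + ex) 0,
            c ++ List.replicate (List.countP (fun y => decide (row.getD y 0 ≠ 0)) l +
              (if (fun y => decide (row.getD y 0 ≠ 0)) y = true then 1 else 0) + ex) 0, rr),
           v.length, ri) y
          = (((v ++ [row.getD y 0]) ++
                List.replicate (List.countP (fun y => decide (row.getD y 0 ≠ 0)) l + ex) 0,
              (c ++ [(y : Int)]) ++
                List.replicate (List.countP (fun y => decide (row.getD y 0 ≠ 0)) l + ex) 0, rr),
             (v ++ [row.getD y 0]).length, ri) := by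
        unfold fA
        rw [if_pos hy]
        rw [show (if decide (row.getD y 0 ≠ 0) = true then 1 else 0) = 1 from by
              rw [decide_eq_true hy]; rfl]
        rw [show List.countP (fun y => decide (row.getD y 0 ≠ 0)) l + 1 + ex
              = (List.countP (fun y => decide (row.getD y 0 ≠ 0)) l + ex) + 1 from by omega,
            List.replicate_succ]
        simp [h]
      rw [hstep]
      have hfb : fB row (v, c) y = (v ++ [row.getD y 0], c ++ [(y : Int)]) := by
        unfold fB; rw [if_pos hy]
      rw [hfb]
      simpa using ih (v ++ [row.getD y 0]) (c ++ [(y : Int)]) rr ex ri (by simp [h])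
    · have hstep : ∀ st, fA row st y = st := by
        intro st; unfold fA; rw [if_neg hy]
      have hfb : fB row (v, c) y = (v, c) := by unfold fB; rw [if_neg hy]
      simp only [hy, decide_false, hstep, hfb]
      exact ih v c rr ex ri h

theorem outer_rel (m : Nat) (rows : List (List Int)) : ∀ (v c rr : List Int),
    c.length = v.length →
    rows.foldl (gA m)
      ((v ++ List.replicate (totCnt m rows) 0, c ++ List.replicate (totCnt m rows) 0,
        rr ++ List.replicate rows.length 0), v.length, rr.length)
    = (((rows.foldl (gB m) (v, c, rr)).1, (rows.foldl (gB m) (v, c, rr)).2.1,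
         (rows.foldl (gB m) (v, c, rr)).2.2),
       (rows.foldl (gB m) (v, c, rr)).1.length,
       (rows.foldl (gB m) (v, c, rr)).2.2.length) := by
  induction rows with
  | nil => intro v c rr h; simp [totCnt]
  | cons row rows ih =>
    intro v c rr h
    have hin := inner_rel row (List.range m) v c
        (rr ++ List.replicate (rows.length + 1) 0) (totCnt m rows) rr.length h
    simp only [List.foldl_cons]
    have hga : gA m ((v ++ List.replicate (totCnt m (row :: rows)) 0,
          c ++ List.replicate (totCnt m (row :: rows)) 0,
          rr ++ List.replicate (row :: rows).length 0), v.length, rr.length) row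
        = ((((List.range m).foldl (fB row) (v, c)).1 ++ List.replicate (totCnt m rows) 0,
            ((List.range m).foldl (fB row) (v, c)).2 ++ List.replicate (totCnt m rows) 0,
            (rr ++ [(((List.range m).foldl (fB row) (v, c)).1.length : Int)]) ++
              List.replicate rows.length 0),
           ((List.range m).foldl (fB row) (v, c)).1.length, rr.length + 1) := by
      unfold gA
      rw [show totCnt m (row :: rows) = List.countP (fun y => decide (row.getD y 0 ≠ 0))
            (List.range m) + totCnt m rows from by simp [totCnt, cntRow]]
      rw [show (row :: rows).length = rows.length + 1 from rfl]
      rw [hin, List.replicate_succ]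
      simp
    rw [hga]
    have hgb : gB m (v, c, rr) row
        = (((List.range m).foldl (fB row) (v, c)).1, ((List.range m).foldl (fB row) (v, c)).2,
           rr ++ [(((List.range m).foldl (fB row) (v, c)).1.length : Int)]) := rfl
    rw [hgb]
    have hlen2 := fB_len row (List.range m) (v, c) h
    simpa using ih ((List.range m).foldl (fB row) (v, c)).1
        ((List.range m).foldl (fB row) (v, c)).2
        (rr ++ [(((List.range m).foldl (fB row) (v, c)).1.length : Int)]) hlen2

theorem getnnz_eq_totCnt (mat : List (List Int)) :
    (getnnz mat).toNat = totCnt (mat.headD []).length mat := by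
  have h1 : getnnz mat = mat.foldl (fun c row =>
      (List.range (mat.headD []).length).foldl
        (fun c y => if row.getD y 0 ≠ 0 then c + 1 else c) c) 0 :=
    foldl_range_getD mat ([] : List Int)
      (fun c row => (List.range (mat.headD []).length).foldl
        (fun c y => if row.getD y 0 ≠ 0 then c + 1 else c) c) 0
  have h2 : ∀ (c : Int), ∀ row ∈ mat, (List.range (mat.headD []).length).foldl
      (fun c y => if row.getD y 0 ≠ 0 then c + 1 else c) c
      = c + (cntRow (mat.headD []).length row : Int) := by
    intro c row _
    simpa [cntRow] using PySem.List.foldl_count_if (fun y => decide (row.getD y 0 ≠ 0))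
      (List.range (mat.headD []).length) c
  rw [h1, PySem.List.foldl_congr_mem mat _
        (fun c row => c + (cntRow (mat.headD []).length row : Int)) 0 h2,
      PySem.List.foldl_add mat (fun row => (cntRow (mat.headD []).length row : Int)) 0]
  unfold totCnt
  rw [show (mat.map fun row => (cntRow (mat.headD []).length row : Int)).sum
        = ((mat.map (cntRow (mat.headD []).length)).sum : Int) from by
      rw [Nat.cast_list_sum, List.map_map]; rfl]
  omega

theorem mat2csr_eq_fold (mat : List (List Int)) :
    mat2csr mat =
      (let m := (mat.headD []).length
       let nnz := totCnt m mat
       let fin := mat.foldl (gA m)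
         ((List.replicate nnz 0, List.replicate nnz 0, 0 :: List.replicate mat.length 0), 0, 1)
       [fin.1.1, fin.1.2.1, fin.1.2.2]) := by
  have h0 : mat2csr mat =
      (let fin := (List.range mat.length).foldl
          (fun st x => gA (mat.headD []).length st (mat.getD x []))
          ((List.replicate (getnnz mat).toNat 0, List.replicate (getnnz mat).toNat 0,
            (List.replicate (mat.length + 1) 0).set 0 0), 0, 1)
       [fin.1.1, fin.1.2.1, fin.1.2.2]) := rfl
  rw [h0, foldl_range_getD mat ([] : List Int) (gA (mat.headD []).length)]
  rw [show (List.replicate (mat.length + 1) 0 : List Int).set 0 0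
        = 0 :: List.replicate mat.length 0 from by rw [List.replicate_succ]; rfl]
  rw [getnnz_eq_totCnt]

-- B-side: the inner fold of the streaming spec produces exactly the per-row pairs
theorem fB_eq_rowP (row : List Int) (l : List Nat) : ∀ (v c : List Int),
    l.foldl (fB row) (v, c)
      = (v ++ (l.filterMap (fun (y : Nat) =>
            if row.getD y 0 ≠ 0 then some ((y : Int), row.getD y 0) else none)).map
            (fun q => q.2),
         c ++ (l.filterMap (fun (y : Nat) =>
            if row.getD y 0 ≠ 0 then some ((y : Int), row.getD y 0) else none)).map
            (fun q => q.1)) := by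
  induction l with
  | nil => intro v c; simp
  | cons y l ih =>
    intro v c
    simp only [List.foldl_cons, List.filterMap_cons]
    by_cases hy : row.getD y 0 ≠ 0
    · have hfb : fB row (v, c) y = (v ++ [row.getD y 0], c ++ [(y : Int)]) := by
        unfold fB; rw [if_pos hy]
      rw [hfb, if_pos hy, ih]
      simp
    · have hfb : fB row (v, c) y = (v, c) := by unfold fB; rw [if_neg hy]
      rw [hfb, if_neg hy, ih]

-- the streaming fold produces flattened projections and the Rlist row pointers
theorem gB_fold (m : Nat) (rows : List (List Int)) : ∀ (v c rr : List Int),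
    rows.foldl (gB m) (v, c, rr)
      = (v ++ rows.flatMap (fun row => (rowP m row).map (fun q => q.2)),
         c ++ rows.flatMap (fun row => (rowP m row).map (fun q => q.1)),
         rr ++ Rlist m v.length rows) := by
  induction rows with
  | nil => intro v c rr; simp [Rlist]
  | cons row rows ih =>
    intro v c rr
    simp only [List.foldl_cons]
    have hgb : gB m (v, c, rr) row
        = (v ++ (rowP m row).map (fun q => q.2), c ++ (rowP m row).map (fun q => q.1),
           rr ++ [((v ++ (rowP m row).map (fun q => q.2)).length : Int)]) := by
      unfold gB
      rw [show (List.range m).foldl (fB row) ((v, c, rr).1, (v, c, rr).2.1)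
            = (v ++ (rowP m row).map (fun q => q.2), c ++ (rowP m row).map (fun q => q.1))
          from fB_eq_rowP row (List.range m) v c]
    rw [hgb, ih]
    simp [Rlist, List.append_assoc, List.length_append, List.length_map]

theorem Rlist_eq_map (m : Nat) (rows : List (List Int)) : ∀ (base : Nat),
    Rlist m base rows = (List.range rows.length).map (fun i =>
      (base : Int) + ((rows.take (i + 1)).map (fun row => ((rowP m row).length : Int))).sum) := by
  induction rows with
  | nil => intro base; simp [Rlist]
  | cons row rows ih =>
    intro base
    simp only [Rlist]
    rw [show (row :: rows).length = rows.length + 1 from rfl, List.range_succ_eq_map,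
        List.map_cons, List.map_map, ih (base + (rowP m row).length)]
    refine List.cons_eq_cons.mpr ⟨?_, ?_⟩
    · simp only [List.take_succ_cons, List.take_zero, List.map_cons, List.map_nil,
        List.sum_cons, List.sum_nil]
      push_cast
      ring
    · apply List.map_congr_left
      intro i _
      simp only [Function.comp, List.take_succ_cons, List.map_cons, List.sum_cons]
      push_cast
      ring

-- ===== VERDICT helper: B's port in streaming-fold form =====
theorem mat2csr_alt_eq (mat : List (List Int)) :
    mat2csr_alt mat
      = [mat.flatMap (fun row => (rowP (mat.headD []).length row).map (fun q => q.2)),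
         mat.flatMap (fun row => (rowP (mat.headD []).length row).map (fun q => q.1)),
         0 :: Rlist (mat.headD []).length 0 mat] := by
  have h0 : mat2csr_alt mat
      = [(mat.map (rowP (mat.headD []).length)).flatMap (fun p => p.map (fun q => q.2)),
         (mat.map (rowP (mat.headD []).length)).flatMap (fun p => p.map (fun q => q.1)),
         (List.range (mat.length + 1)).map (fun i =>
           (((mat.map (rowP (mat.headD []).length)).take i).map
             (fun p => (p.length : Int))).sum)] := rfl
  have hr : (List.range (mat.length + 1)).map (fun i =>
      (((mat.map (rowP (mat.headD []).length)).take i).map (fun p => (p.length : Int))).sum)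
      = 0 :: Rlist (mat.headD []).length 0 mat := by
    rw [List.range_succ_eq_map, List.map_cons, List.map_map]
    refine List.cons_eq_cons.mpr ⟨by simp, ?_⟩
    rw [Rlist_eq_map (mat.headD []).length mat 0]
    apply List.map_congr_left
    intro i _
    simp only [Function.comp]
    rw [← List.map_take, List.map_map]
    simp
    rfl

  rw [h0, hr]
  simp [List.flatMap_map]

theorem mat2csr_spec : Claim_equal_mat2csr := by
  intro mat _hdom _hpre
  unfold Spec_mat2csr
  rw [mat2csr_eq_fold]
  have h := outer_rel (mat.headD []).length mat [] [] [0] rfl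
  simp only [List.nil_append, List.length_cons, List.length_nil, List.cons_append,
    Nat.zero_add] at h
  simp only [h]
  rw [gB_fold (mat.headD []).length mat [] [] [0], mat2csr_alt_eq]
  simp [rowP]
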